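-- pv_equiv track=rewrite | github.com/austencloud/the-kinetic-constructor | main_window/main_widget/sequence_widget/sequence_rotation_manager.py | _determine_grid_mode
-- ===== SOURCE A (Python) =====
-- def _determine_grid_mode(rotated_sequence):
--     """
--     Determine if the rotated sequence should be displayed in diamond (cardinal)
--     or box (intercardinal) mode based on the end_locs found in the sequence.
--     """
--     cardinal_set = {"n", "e", "s", "w"}
--     intercardinal_set = {"ne", "se", "sw", "nw"}
--
--     # Gather all end_locs from rotated_sequence
--     all_locs = []
--
--     # Start position beat end locs
--     start_pos_beat = rotated_sequence[1]
--     if "blue_attributes" in start_pos_beat and "red_attributes" in start_pos_beat: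
--         bl = start_pos_beat["blue_attributes"].get("end_loc")
--         rl = start_pos_beat["red_attributes"].get("end_loc")
--         if bl: all_locs.append(bl)
--         if rl: all_locs.append(rl)
--
--     # Other beats
--     for beat in rotated_sequence[2:]:
--         if "blue_attributes" in beat and "red_attributes" in beat:
--             bl = beat["blue_attributes"].get("end_loc")
--             rl = beat["red_attributes"].get("end_loc")
--             if bl: all_locs.append(bl)
--             if rl: all_locs.append(rl)
--
--     # Decide grid mode
--     if all(l in cardinal_set for l in all_locs):
--         mode = "diamond"
--     elif all(l in intercardinal_set for l in all_locs):
--         mode = "box"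
--     else:
--         # Mixed, choose majority
--         cardinal_count = sum(l in cardinal_set for l in all_locs)
--         inter_count = sum(l in intercardinal_set for l in all_locs)
--         mode = "diamond" if cardinal_count >= inter_count else "box"
--
--     return mode
-- ===== SOURCE B (Python) =====
-- def _determine_grid_mode(rotated_sequence):
--     """One pass over the beats with three counters; no intermediate loc list."""
--     cardinal_set = {"n", "e", "s", "w"}
--     intercardinal_set = {"ne", "se", "sw", "nw"}
--
--     total = cardinal_count = inter_count = 0
--     for beat in rotated_sequence[1:]:
--         if "blue_attributes" in beat and "red_attributes" in beat:
--             for loc in (beat["blue_attributes"].get("end_loc"),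
--                         beat["red_attributes"].get("end_loc")):
--                 if loc:
--                     total += 1
--                     if loc in cardinal_set:
--                         cardinal_count += 1
--                     elif loc in intercardinal_set:
--                         inter_count += 1
--
--     if cardinal_count == total:
--         return "diamond"
--     if inter_count == total:
--         return "box"
--     return "diamond" if cardinal_count >= inter_count else "box"
-- ===== Notes on version B (the rewrite author's own statement) =====
-- stated objective: simpler
-- what changed: Replaces A's gather-then-rescan design (build an all_locs list, then up to four separate passes over it: two all() scans and two sum() scans) by a single fold over the beats that maintains three integer counters (total, cardinal, intercardinal) and decides the mode from them. (On sequences shorter than 2, where A raises IndexError at rotated_sequence[1], Pre_ excludes the input; B there happens to return 'diamond'.)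
import Mathlib
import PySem

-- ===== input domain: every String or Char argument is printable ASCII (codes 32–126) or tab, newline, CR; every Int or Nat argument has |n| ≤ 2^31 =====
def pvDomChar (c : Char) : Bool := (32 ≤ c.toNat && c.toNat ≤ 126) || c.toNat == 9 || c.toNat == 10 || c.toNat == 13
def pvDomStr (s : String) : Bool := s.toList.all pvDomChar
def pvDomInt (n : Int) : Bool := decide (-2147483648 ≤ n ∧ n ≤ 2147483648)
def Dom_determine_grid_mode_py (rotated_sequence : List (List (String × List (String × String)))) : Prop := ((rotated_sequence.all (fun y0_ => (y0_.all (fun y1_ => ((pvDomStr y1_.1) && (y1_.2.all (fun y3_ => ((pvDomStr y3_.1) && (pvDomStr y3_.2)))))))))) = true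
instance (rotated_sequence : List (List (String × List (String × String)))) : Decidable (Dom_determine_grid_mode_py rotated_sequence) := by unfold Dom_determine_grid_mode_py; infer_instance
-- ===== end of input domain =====

-- B replaces A's gather-then-rescan design (intermediate all_locs list + several scans over it)
-- by a single fold over the beats maintaining three counters; equal return value on Pre_ (length ≥ 2).

-- ===== PORT A =====
-- one step of A's all_locs-building loop body (shared shape for the start beat and the `for beat` loop)
def pvCollectA (locs : List String) (beat : List (String × List (String × String))) : List String :=
  let d := PySem.Dict.ofList beat
  if d.contains "blue_attributes" && d.contains "red_attributes" then
    let bl := (PySem.Dict.ofList (d.getD "blue_attributes" [])).get? "end_loc"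
    let rl := (PySem.Dict.ofList (d.getD "red_attributes" [])).get? "end_loc"
    let locs1 := match bl with
      | some s => if s = "" then locs else locs ++ [s]
      | none => locs
    match rl with
      | some s => if s = "" then locs1 else locs1 ++ [s]
      | none => locs1
  else locs

def determine_grid_mode_py (rotated_sequence : List (List (String × List (String × String)))) : String :=
  let cardinal := PySem.Set.ofList ["n", "e", "s", "w"]
  let inter := PySem.Set.ofList ["ne", "se", "sw", "nw"]
  -- rotated_sequence[1]: Python raises IndexError when the list is shorter; excluded by Pre_
  let start_pos_beat := (PySem.List.pyGet? rotated_sequence 1).getD []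
  let all_locs := pvCollectA [] start_pos_beat
  let all_locs := (PySem.List.slice rotated_sequence (some 2) none).foldl pvCollectA all_locs
  if all_locs.all (fun l => PySem.Set.contains cardinal l) then "diamond"
  else if all_locs.all (fun l => PySem.Set.contains inter l) then "box"
  else
    let cardinal_count := (all_locs.map (fun l => if PySem.Set.contains cardinal l then (1 : Int) else 0)).sum
    let inter_count := (all_locs.map (fun l => if PySem.Set.contains inter l then (1 : Int) else 0)).sum
    if cardinal_count ≥ inter_count then "diamond" else "box"

-- ===== PORT B =====
-- the inner `if loc:` body of Source B: bump (total, cardinal_count, inter_count)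
def pvTallyB (st : Int × Int × Int) (loc : Option String) : Int × Int × Int :=
  match loc with
  | none => st
  | some s =>
    if s = "" then st
    else
      let (t, c, i) := st
      if PySem.Set.contains (PySem.Set.ofList ["n", "e", "s", "w"]) s then (t + 1, c + 1, i)
      else if PySem.Set.contains (PySem.Set.ofList ["ne", "se", "sw", "nw"]) s then (t + 1, c, i + 1)
      else (t + 1, c, i)

-- one beat of Source B's single loop
def pvStepB (st : Int × Int × Int) (beat : List (String × List (String × String))) : Int × Int × Int :=
  let d := PySem.Dict.ofList beat
  if d.contains "blue_attributes" && d.contains "red_attributes" then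
    pvTallyB (pvTallyB st ((PySem.Dict.ofList (d.getD "blue_attributes" [])).get? "end_loc"))
      ((PySem.Dict.ofList (d.getD "red_attributes" [])).get? "end_loc")
  else st

def determine_grid_mode_py_alt (rotated_sequence : List (List (String × List (String × String)))) : String :=
  let st := (PySem.List.slice rotated_sequence (some 1) none).foldl pvStepB (0, 0, 0)
  let t := st.1
  let c := st.2.1
  let i := st.2.2
  if c = t then "diamond"
  else if i = t then "box"
  else if c ≥ i then "diamond" else "box"

-- ===== PRECONDITION & SPEC =====
-- A evaluates rotated_sequence[1], so it raises IndexError on lists of length < 2; only those are excluded.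
def Pre_determine_grid_mode_py (rotated_sequence : List (List (String × List (String × String)))) : Prop :=
  2 ≤ rotated_sequence.length
instance (rotated_sequence : List (List (String × List (String × String)))) : Decidable (Pre_determine_grid_mode_py rotated_sequence) := by unfold Pre_determine_grid_mode_py; infer_instance

def pvWitness_determine_grid_mode_py : (List (List (String × List (String × String)))) :=
  [[], [("blue_attributes", [("end_loc", "n")]), ("red_attributes", [("end_loc", "e")])]]

def Spec_determine_grid_mode_py (rotated_sequence : List (List (String × List (String × String)))) (out : String) : Prop := out = determine_grid_mode_py_alt rotated_sequence
instance (rotated_sequence : List (List (String × List (String × String)))) (out : String) : Decidable (Spec_determine_grid_mode_py rotated_sequence out) := by unfold Spec_determine_grid_mode_py; infer_instance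

-- ===== CLAIM (what is proved, stated in full; the proofs are below) =====
def Claim_equal_determine_grid_mode_py : Prop := ∀ (rotated_sequence : List (List (String × List (String × String)))), Dom_determine_grid_mode_py rotated_sequence → Pre_determine_grid_mode_py rotated_sequence → Spec_determine_grid_mode_py rotated_sequence (determine_grid_mode_py rotated_sequence)

-- ===== LEMMAS AND PROOFS =====

-- the statistics B maintains, as a function of A's all_locs list
def pvStats (locs : List String) : Int × Int × Int :=
  ((locs.length : Int),
   ((locs.countP (fun l => PySem.Set.contains (PySem.Set.ofList ["n", "e", "s", "w"]) l) : Nat) : Int),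
   ((locs.countP (fun l => PySem.Set.contains (PySem.Set.ofList ["ne", "se", "sw", "nw"]) l) : Nat) : Int))

lemma pvDisjCard (s : String)
    (h : PySem.Set.contains (PySem.Set.ofList ["n", "e", "s", "w"]) s = true) :
    PySem.Set.contains (PySem.Set.ofList ["ne", "se", "sw", "nw"]) s = false := by
  rw [PySem.Set.contains_iff, PySem.Set.mem_ofList] at h
  simp only [List.mem_cons, List.not_mem_nil, or_false] at h
  rcases h with h | h | h | h <;> subst h <;> decide

lemma pvTally_stats (locs : List String) (o : Option String) :
    pvTallyB (pvStats locs) o =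
      pvStats (match o with
        | some s => if s = "" then locs else locs ++ [s]
        | none => locs) := by
  cases o with
  | none => rfl
  | some s =>
    by_cases h : s = ""
    · simp [pvTallyB, h]
    · by_cases hc : PySem.Set.contains (PySem.Set.ofList ["n", "e", "s", "w"]) s
      · simp only [pvTallyB, pvStats, h, if_false, hc, if_true, List.countP_append,
          List.countP_singleton, List.length_append, List.length_singleton, pvDisjCard s hc,
          Bool.false_eq_true, Prod.mk.injEq]
        refine ⟨by push_cast; ring, by push_cast; ring, by simp⟩
      · by_cases hi : PySem.Set.contains (PySem.Set.ofList ["ne", "se", "sw", "nw"]) s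
        · simp only [pvTallyB, pvStats, h, if_false, hc, hi, if_true, List.countP_append,
            List.countP_singleton, List.length_append, List.length_singleton,
            Bool.false_eq_true, Prod.mk.injEq]
          refine ⟨by push_cast; ring, by simp, by push_cast; ring⟩
        · simp only [pvTallyB, pvStats, h, if_false, hc, hi, List.countP_append,
            List.countP_singleton, List.length_append, List.length_singleton,
            Bool.false_eq_true, Prod.mk.injEq]
          refine ⟨by push_cast; ring, by simp, by simp⟩

lemma pvStep_stats (locs : List String) (beat : List (String × List (String × String))) :
    pvStepB (pvStats locs) beat = pvStats (pvCollectA locs beat) := by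
  unfold pvStepB pvCollectA
  by_cases hbr : ((PySem.Dict.ofList beat).contains "blue_attributes"
      && (PySem.Dict.ofList beat).contains "red_attributes") = true
  · simp only [hbr, if_true, pvTally_stats]
  · simp only [Bool.not_eq_true] at hbr
    simp only [hbr, Bool.false_eq_true, if_false]

lemma pvFold_stats (beats : List (List (String × List (String × String)))) (locs : List String) :
    beats.foldl pvStepB (pvStats locs) = pvStats (beats.foldl pvCollectA locs) := by
  induction beats generalizing locs with
  | nil => rfl
  | cons b bs ih => simp only [List.foldl_cons, pvStep_stats, ih]

lemma pvDecision (L : List String) :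
    (if (pvStats L).2.1 = (pvStats L).1 then "diamond"
     else if (pvStats L).2.2 = (pvStats L).1 then "box"
     else if (pvStats L).2.1 ≥ (pvStats L).2.2 then "diamond" else "box")
    = (if L.all (fun l => PySem.Set.contains (PySem.Set.ofList ["n", "e", "s", "w"]) l) then "diamond"
       else if L.all (fun l => PySem.Set.contains (PySem.Set.ofList ["ne", "se", "sw", "nw"]) l) then "box"
       else if (L.map (fun l => if PySem.Set.contains (PySem.Set.ofList ["n", "e", "s", "w"]) l then (1 : Int) else 0)).sum
              ≥ (L.map (fun l => if PySem.Set.contains (PySem.Set.ofList ["ne", "se", "sw", "nw"]) l then (1 : Int) else 0)).sum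
            then "diamond" else "box") := by
  have hcnt : ∀ p : String → Bool, L.all p = true ↔ ((L.countP p : Nat) : Int) = (L.length : Int) := by
    intro p
    rw [Nat.cast_inj, List.countP_eq_length, List.all_eq_true]
  rw [PySem.List.sum_map_ite_one_zero, PySem.List.sum_map_ite_one_zero]
  simp only [pvStats]
  by_cases h1 : L.all (fun l => PySem.Set.contains (PySem.Set.ofList ["n", "e", "s", "w"]) l) = true
  · rw [if_pos ((hcnt _).mp h1), if_pos h1]
  · rw [if_neg (fun h => h1 ((hcnt _).mpr h)), if_neg h1]
    by_cases h2 : L.all (fun l => PySem.Set.contains (PySem.Set.ofList ["ne", "se", "sw", "nw"]) l) = true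
    · rw [if_pos ((hcnt _).mp h2), if_pos h2]
    · rw [if_neg (fun h => h2 ((hcnt _).mpr h)), if_neg h2]
      rfl

-- ===== VERDICT (by name: the statement is the Claim_ definition above) =====
theorem determine_grid_mode_py_spec : Claim_equal_determine_grid_mode_py := by
  intro rs _ hpre
  unfold Spec_determine_grid_mode_py
  unfold Pre_determine_grid_mode_py at hpre
  match rs, hpre with
  | a :: b :: rest, _ =>
    have h1 : PySem.List.pyGet? (a :: b :: rest) (1 : Int) = some b := by
      simp [PySem.List.pyGet?, PySem.List.pyIdx?]
    have h2 : PySem.List.slice (a :: b :: rest) (some 2) none = rest := by simp [pysem]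
    simp only [determine_grid_mode_py, determine_grid_mode_py_alt, h1, h2,
      PySem.List.slice_from_one, List.tail_cons, Option.getD_some]
    rw [show ((0, 0, 0) : Int × Int × Int) = pvStats [] from rfl, List.foldl_cons,
      pvStep_stats, pvFold_stats]
    exact (pvDecision (rest.foldl pvCollectA (pvCollectA [] b))).symm
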